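-- pv_equiv track=rewrite | github.com/jessekv/nqueens-in-python-packaging | generate_packages.py | get_exclusions
-- ===== SOURCE A (Python) =====
-- import itertools
--
-- GRID_SIZE = 8
--
-- def to_name(column: int) -> str:
--     return f"queen_{chr(ord('a') + column)}"
--
-- def to_version(row: int) -> str:
--     return f"{row + 1}"
--
-- def exclude(column: int, row: int) -> str:
--     return f"{to_name(column)} != {to_version(row)}"
--
-- def get_exclusions(column: int, row: int) -> list[str]:
--     return [
--         exclude(c, r)
--         for c, r in itertools.product(range(GRID_SIZE), repeat=2)
--         if (
--             # column exclusion (row exclusion is implicit)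
--             (r == row and c != column)
--             # diagonal exclusion
--             or ((d_c := abs(c - column)) == (d_r := abs(r - row)) and (d_c or d_r))
--         )
--     ]
-- ===== SOURCE B (Python) =====
-- GRID_SIZE = 8
--
-- def to_name(column: int) -> str:
--     return f"queen_{chr(ord('a') + column)}"
--
-- def to_version(row: int) -> str:
--     return f"{row + 1}"
--
-- def exclude(column: int, row: int) -> str:
--     return f"{to_name(column)} != {to_version(row)}"
--
-- def get_exclusions(column: int, row: int) -> list[str]:
--     out = []
--     for c in range(GRID_SIZE):
--         k = abs(c - column)
--         rows = []
--         if c != column: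
--             rows.append(row)
--         if k != 0:
--             rows.append(row + k)
--             rows.append(row - k)
--         for r in sorted(r for r in rows if 0 <= r < GRID_SIZE):
--             out.append(exclude(c, r))
--     return out
-- ===== Notes on version B (the rewrite author's own statement) =====
-- stated objective: alternative
-- what changed: Instead of scanning all GRID_SIZE**2 cells via itertools.product and testing each against the row/diagonal predicate, B loops over columns only and directly constructs the at-most-3 candidate rows (row, row+k, row-k with k=|c-column|), filters them to the grid and sorts them, preserving the exact output order.
import Mathlib
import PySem

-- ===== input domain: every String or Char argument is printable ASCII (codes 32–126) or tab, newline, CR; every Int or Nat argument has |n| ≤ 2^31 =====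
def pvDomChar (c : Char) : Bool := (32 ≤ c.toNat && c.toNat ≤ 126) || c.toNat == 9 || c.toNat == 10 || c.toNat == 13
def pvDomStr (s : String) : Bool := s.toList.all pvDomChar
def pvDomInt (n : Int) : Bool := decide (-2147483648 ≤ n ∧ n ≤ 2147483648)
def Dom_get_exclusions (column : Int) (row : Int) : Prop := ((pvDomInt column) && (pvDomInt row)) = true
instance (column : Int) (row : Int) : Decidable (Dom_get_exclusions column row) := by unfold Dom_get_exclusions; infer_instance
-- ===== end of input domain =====

-- B enumerates, per column c, the at-most-3 candidate rows (row and row±|c-column|) directly,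
-- instead of A's scan of all GRID_SIZE**2 cells; equal output proved for all inputs (A is total).

-- ===== PORT A =====
-- helpers (to_name/exclude are only ever called with 0 ≤ column < 8, where Char.ofNat = chr exactly)
def to_name (column : Int) : String :=
  "queen_" ++ String.ofList [Char.ofNat (97 + column).toNat]

def to_version (row : Int) : String := PySem.Int.toStr (row + 1)

def exclude (column : Int) (row : Int) : String :=
  to_name column ++ " != " ++ to_version row

def get_exclusions (column : Int) (row : Int) : List String :=
  -- comprehension over itertools.product(range(8), repeat=2) with the row/diagonal predicate
  (PySem.List.pyRange 0 8 1).foldl (fun acc c =>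
    (PySem.List.pyRange 0 8 1).foldl (fun acc r =>
      if (r = row ∧ c ≠ column) ∨
         ((c - column).natAbs = (r - row).natAbs ∧
          ((c - column).natAbs ≠ 0 ∨ (r - row).natAbs ≠ 0))
      then acc ++ [exclude c r] else acc) acc) []

-- ===== PORT B =====
def to_name_alt (column : Int) : String :=
  "queen_" ++ String.ofList [Char.ofNat (97 + column).toNat]

def to_version_alt (row : Int) : String := PySem.Int.toStr (row + 1)

def exclude_alt (column : Int) (row : Int) : String :=
  to_name_alt column ++ " != " ++ to_version_alt row

def get_exclusions_alt (column : Int) (row : Int) : List String :=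
  (PySem.List.pyRange 0 8 1).foldl (fun out c =>
    let k : Int := ((c - column).natAbs : Int)
    let rows : List Int :=
      (if c ≠ column then [row] else []) ++ (if k ≠ 0 then [row + k, row - k] else [])
    (PySem.List.sorted (rows.filter (fun r => decide (0 ≤ r ∧ r < 8))) (fun x => x) false).foldl
      (fun out r => out ++ [exclude_alt c r]) out) []

-- ===== PRECONDITION & SPEC =====
def Spec_get_exclusions (column : Int) (row : Int) (out : List String) : Prop := out = get_exclusions_alt column row
instance (column : Int) (row : Int) (out : List String) : Decidable (Spec_get_exclusions column row out) := by unfold Spec_get_exclusions; infer_instance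

-- ===== CLAIM (what is proved, stated in full; the proofs are below) =====
def Claim_equal_get_exclusions : Prop := ∀ (column : Int) (row : Int), Dom_get_exclusions column row → Spec_get_exclusions column row (get_exclusions column row)

-- ===== LEMMAS AND PROOFS =====

-- the per-column row lists coincide: A's filtered scan of range(8) equals B's sorted candidate list
lemma inner_rows_eq (column row c : Int) :
    ([0,1,2,3,4,5,6,7] : List Int).filter
      (fun r => decide ((r = row ∧ c ≠ column) ∨
        ((c - column).natAbs = (r - row).natAbs ∧
         ((c - column).natAbs ≠ 0 ∨ (r - row).natAbs ≠ 0))))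
    = PySem.List.sorted
        (((if c ≠ column then [row] else []) ++
          (if ((c - column).natAbs : Int) ≠ 0 then
            [row + ((c - column).natAbs : Int), row - ((c - column).natAbs : Int)] else [])).filter
          (fun r => decide (0 ≤ r ∧ r < 8))) (fun x => x) false := by
  by_cases hc : c = column
  · subst hc
    rw [if_neg (fun h => h rfl), if_neg (by omega), List.nil_append, List.filter_nil]
    rw [show PySem.List.sorted ([] : List Int) (fun x => x) false = [] from rfl]
    rw [List.filter_eq_nil_iff]
    intro r _
    simp only [decide_eq_true_eq]
    omega
  · have hk : ((c - column).natAbs : Int) ≠ 0 := by omega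
    rw [if_pos (by exact hc), if_pos hk, List.cons_append, List.nil_append]
    symm
    apply PySem.List.sorted_eq_of_perm_of_pairwise_lt
    · -- the filtered range(8) is a permutation of the filtered candidate list
      apply List.perm_of_nodup_nodup_toFinset_eq
      · exact List.Nodup.filter _ (by decide)
      · refine List.Nodup.filter _ ?_
        simp only [List.nodup_cons, List.mem_cons, List.not_mem_nil, not_false_eq_true,
          List.nodup_nil, and_true, or_false, not_or]
        omega
      · ext r
        simp only [List.mem_toFinset, List.mem_filter, decide_eq_true_eq, List.mem_cons,
          List.not_mem_nil, or_false]
        omega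
    · exact List.Pairwise.filter _ (by decide)

-- the body of A's outer fold equals the body of B's outer fold
lemma outer_body_eq (column row : Int) (acc : List String) (c : Int) :
    (PySem.List.pyRange 0 8 1).foldl (fun acc r =>
      if (r = row ∧ c ≠ column) ∨
         ((c - column).natAbs = (r - row).natAbs ∧
          ((c - column).natAbs ≠ 0 ∨ (r - row).natAbs ≠ 0))
      then acc ++ [exclude c r] else acc) acc
    = (let k : Int := ((c - column).natAbs : Int)
       let rows : List Int :=
         (if c ≠ column then [row] else []) ++ (if k ≠ 0 then [row + k, row - k] else [])
       (PySem.List.sorted (rows.filter (fun r => decide (0 ≤ r ∧ r < 8))) (fun x => x) false).foldl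
         (fun out r => out ++ [exclude_alt c r]) acc) := by
  show _ = (PySem.List.sorted _ (fun x => x) false).foldl _ acc
  rw [PySem.List.foldl_append_ite, PySem.List.foldl_append_singleton_eq_map]
  rw [show PySem.List.pyRange 0 8 1 = ([0,1,2,3,4,5,6,7] : List Int) from rfl]
  rw [inner_rows_eq column row c]
  rfl

-- ===== VERDICT (by name: the statement is the Claim_ definition above) =====
theorem get_exclusions_spec : Claim_equal_get_exclusions := by
  intro column row _
  show get_exclusions column row = get_exclusions_alt column row
  unfold get_exclusions get_exclusions_alt
  apply PySem.List.foldl_congr_mem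
  intro acc c _
  exact outer_body_eq column row acc c
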